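-- pv_equiv track=rewrite | github.com/reyyishreyas/Xthelete_scheduler | python-backend/app/algorithms/tournament_algorithms.py | calculate_group_penalty
-- ===== SOURCE A (Python) =====
-- from typing import List, Dict, Set, Optional, Tuple, Any
--
-- def calculate_group_penalty(group: List[Dict]) -> int:
--     """Calculate penalty score for a group (same-club pairs)"""
--     club_counts = {}
--     penalty = 0
--
--     for player in group:
--         club_id = player['club_id']
--         count = club_counts.get(club_id, 0)
--         club_counts[club_id] = count + 1
--
--         # Each additional player from same club adds to penalty
--         if count > 0:
--             penalty += count
--
--     return penalty
-- ===== SOURCE B (Python) =====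
-- def calculate_group_penalty(group):
--     """Calculate penalty score for a group (same-club pairs)"""
--     counts = {}
--     for player in group:
--         cid = player['club_id']
--         counts[cid] = counts.get(cid, 0) + 1
--     return sum(n * (n - 1) // 2 for n in counts.values())
-- ===== Notes on version B (the rewrite author's own statement) =====
-- stated objective: simpler
-- what changed: B replaces A's incremental running-penalty accumulation inside the counting loop by a count-then-closed-form reduction: it first tallies players per club, then returns sum(n*(n-1)//2) over the tallies.
import Mathlib
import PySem

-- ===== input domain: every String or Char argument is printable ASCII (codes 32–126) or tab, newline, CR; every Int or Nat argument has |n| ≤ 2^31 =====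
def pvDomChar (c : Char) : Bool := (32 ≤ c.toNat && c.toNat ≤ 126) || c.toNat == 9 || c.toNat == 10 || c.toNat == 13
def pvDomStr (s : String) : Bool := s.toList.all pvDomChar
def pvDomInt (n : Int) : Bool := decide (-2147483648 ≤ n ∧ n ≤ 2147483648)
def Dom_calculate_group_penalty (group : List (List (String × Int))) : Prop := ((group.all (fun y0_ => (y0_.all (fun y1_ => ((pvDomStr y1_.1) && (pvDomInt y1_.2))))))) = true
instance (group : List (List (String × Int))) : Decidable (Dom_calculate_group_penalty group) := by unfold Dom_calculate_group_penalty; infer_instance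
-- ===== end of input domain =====

-- B replaces A's incremental running-penalty accumulation by a two-phase count-then-closed-form
-- (sum of n*(n-1)//2 over the per-club tallies) computation of the same value (objective: simpler).


-- player['club_id'] (shared accessor; the .getD 0 default is never reached inside Pre_,
-- where the key is present — Python raises KeyError there, excluded by Pre_)
def pvClubId (player : List (String × Int)) : Int :=
  ((PySem.Dict.mk player).get? "club_id").getD 0

-- ===== PORT A =====
def calculate_group_penalty (group : List (List (String × Int))) : Int :=
  (group.foldl
    (fun (st : PySem.Dict Int Int × Int) player =>
      let club_id := pvClubId player
      let count := st.1.getD club_id 0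
      (st.1.insert club_id (count + 1),
       if count > 0 then st.2 + count else st.2))
    (PySem.Dict.empty, 0)).2

-- ===== PORT B =====
def calculate_group_penalty_alt (group : List (List (String × Int))) : Int :=
  let counts := group.foldl
    (fun (d : PySem.Dict Int Int) player =>
      let cid := pvClubId player
      d.insert cid (d.getD cid 0 + 1))
    PySem.Dict.empty
  (counts.values.map (fun n => PySem.Int.floordiv (n * (n - 1)) 2)).sum

-- ===== PRECONDITION & SPEC =====
-- Pre_ excludes exactly the inputs where some player dict lacks the key 'club_id':
-- Python A raises KeyError there (and so does B).
def Pre_calculate_group_penalty (group : List (List (String × Int))) : Prop :=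
  ∀ player ∈ group, "club_id" ∈ player.map Prod.fst
instance (group : List (List (String × Int))) : Decidable (Pre_calculate_group_penalty group) := by unfold Pre_calculate_group_penalty; infer_instance

def pvWitness_calculate_group_penalty : (List (List (String × Int))) :=
  [[("club_id", 1)], [("club_id", 1)], [("club_id", 2)]]

def Spec_calculate_group_penalty (group : List (List (String × Int))) (out : Int) : Prop := out = calculate_group_penalty_alt group
instance (group : List (List (String × Int))) (out : Int) : Decidable (Spec_calculate_group_penalty group out) := by unfold Spec_calculate_group_penalty; infer_instance

-- ===== CLAIM (what is proved, stated in full; the proofs are below) =====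
def Claim_equal_calculate_group_penalty : Prop := ∀ (group : List (List (String × Int))), Dom_calculate_group_penalty group → Pre_calculate_group_penalty group → Spec_calculate_group_penalty group (calculate_group_penalty group)

-- ===== LEMMAS AND PROOFS =====

-- the pair count n*(n-1)//2
def pvG (n : Int) : Int := PySem.Int.floordiv (n * (n - 1)) 2

lemma pvG_succ (c : Int) : pvG (c + 1) = pvG c + c := by
  unfold pvG
  rw [PySem.Int.floordiv_eq_ediv_of_pos (by norm_num),
      PySem.Int.floordiv_eq_ediv_of_pos (by norm_num)]
  obtain ⟨k, hk⟩ := Int.even_mul_succ_self (c - 1)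
  have h1 : (c + 1) * (c + 1 - 1) = (c * (c - 1)) + 2 * c := by ring
  have h2 : c * (c - 1) = k + k := by linear_combination hk
  omega

-- the counter-building step shared by both loops, over the extracted club ids
def pvIns (d : PySem.Dict Int Int) (x : Int) : PySem.Dict Int Int :=
  d.insert x (d.getD x 0 + 1)

-- A's penalty contribution of the ids still to process, from the current counter
def pvGo (ids : List Int) (d : PySem.Dict Int Int) : Int :=
  match ids with
  | [] => 0
  | x :: t =>
    let c := d.getD x 0
    (if c > 0 then c else 0) + pvGo t (pvIns d x)

-- A's loop body, over an already-extracted club id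
def pvStepA (st : PySem.Dict Int Int × Int) (x : Int) : PySem.Dict Int Int × Int :=
  (st.1.insert x (st.1.getD x 0 + 1),
   if st.1.getD x 0 > 0 then st.2 + st.1.getD x 0 else st.2)

lemma pvA_loop (ids : List Int) (d : PySem.Dict Int Int) (p : Int) :
    (ids.foldl pvStepA (d, p)).2 = p + pvGo ids d := by
  induction ids generalizing d p with
  | nil => simp [pvGo]
  | cons x t ih =>
    simp only [List.foldl_cons, pvGo, pvIns, pvStepA, ih]
    split_ifs <;> ring

-- the closed-form total of a tally: Σ over distinct ids of pvG (count)
def pvF (l : List Int) : Int := ∑ k ∈ l.toFinset, pvG (l.count k)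

lemma pvF_append_singleton (l : List Int) (x : Int) :
    pvF (l ++ [x]) = pvF l + (l.count x : Int) := by
  unfold pvF
  have hcnt : ∀ k : Int, ((l ++ [x]).count k : Int)
      = (l.count k : Int) + (if k = x then 1 else 0) := by
    intro k
    rcases eq_or_ne k x with h | h
    · simp [List.count_append, h]
    · simp [List.count_append, h, Ne.symm h]
  have htf : (l ++ [x]).toFinset = insert x l.toFinset := by
    simp [List.toFinset_append]
  rw [htf]
  by_cases hx : x ∈ l.toFinset
  · rw [Finset.insert_eq_self.mpr hx]
    have : ∀ k ∈ l.toFinset,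
        pvG ((l ++ [x]).count k)
          = pvG (l.count k) + (if k = x then (l.count x : Int) else 0) := by
      intro k _
      rcases eq_or_ne k x with h | h
      · subst h; rw [hcnt]; simp [pvG_succ]
      · rw [hcnt]; simp [h]
    rw [Finset.sum_congr rfl this, Finset.sum_add_distrib,
        Finset.sum_ite_eq' l.toFinset x (fun _ => (l.count x : Int))]
    simp [hx]
  · have hx' : x ∉ l := by simpa using hx
    have hc0 : l.count x = 0 := List.count_eq_zero.mpr hx'
    rw [Finset.sum_insert hx]
    have h1 : pvG ((l ++ [x]).count x) = 0 := by
      rw [hcnt]; simp [hc0, pvG, PySem.Int.floordiv]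
    have h2 : ∀ k ∈ l.toFinset, pvG ((l ++ [x]).count k) = pvG (l.count k) := by
      intro k hk
      have hne : k ≠ x := fun h => hx (h ▸ hk)
      rw [hcnt]; simp [hne]
    rw [Finset.sum_congr rfl h2, h1, hc0]
    simp

lemma pvGetD_foldl (pre : List Int) (x : Int) :
    (pre.foldl pvIns PySem.Dict.empty).getD x 0 = (pre.count x : Int) := by
  unfold pvIns
  rw [PySem.Dict.getD_foldl_insert_add_one]
  simp

lemma pvGo_counter (ids pre : List Int) :
    pvGo ids (pre.foldl pvIns PySem.Dict.empty) = pvF (pre ++ ids) - pvF pre := by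
  induction ids generalizing pre with
  | nil => simp [pvGo]
  | cons x t ih =>
    have hstep : pvIns (pre.foldl pvIns PySem.Dict.empty) x
        = (pre ++ [x]).foldl pvIns PySem.Dict.empty := by
      simp [List.foldl_append]
    have hc : (pre.foldl pvIns PySem.Dict.empty).getD x 0 = (pre.count x : Int) :=
      pvGetD_foldl pre x
    simp only [pvGo, hstep, hc, ih (pre ++ [x])]
    have hF := pvF_append_singleton pre x
    have happ : pre ++ [x] ++ t = pre ++ x :: t := by simp
    rw [happ] at *
    have hnn : (0 : Int) ≤ (pre.count x : Int) := by positivity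
    split_ifs with h <;> omega

lemma pvB_values (ids : List Int) :
    ((ids.foldl pvIns PySem.Dict.empty).values.map pvG).sum = pvF ids := by
  have h1 : ids.foldl pvIns PySem.Dict.empty = PySem.Dict.counter ids := by
    unfold pvIns
    exact PySem.Dict.foldl_insert_getD_add_one_eq_counter ids
  rw [h1]
  have h2 : (PySem.Dict.counter ids).values
      = (PySem.Set.ofList ids).map (fun k => (ids.count k : Int)) := by
    show (PySem.Dict.counter ids).items.map Prod.snd = _
    rw [PySem.Dict.items_counter]
    simp
  rw [h2]
  have hnd : (PySem.Set.ofList ids : List Int).Nodup := PySem.Set.nodup_ofList ids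
  have htf : (PySem.Set.ofList ids : List Int).toFinset = ids.toFinset := by
    apply Finset.ext
    intro a
    simp [PySem.Set.mem_ofList]
  unfold pvF
  rw [← htf, List.sum_toFinset _ hnd]
  simp [List.map_map, Function.comp_def]

-- ===== VERDICT (by name: the statement is the Claim_ definition above) =====
theorem calculate_group_penalty_spec : Claim_equal_calculate_group_penalty := by
  intro group _ _
  unfold Spec_calculate_group_penalty
  have e1 : calculate_group_penalty group
      = ((group.map pvClubId).foldl pvStepA (PySem.Dict.empty, 0)).2 := by
    unfold calculate_group_penalty
    rw [List.foldl_map]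
    rfl
  have e2 : calculate_group_penalty_alt group
      = (((group.map pvClubId).foldl pvIns PySem.Dict.empty).values.map pvG).sum := by
    unfold calculate_group_penalty_alt
    rw [List.foldl_map]
    rfl
  rw [e1, e2, pvA_loop, pvB_values]
  have hGo := pvGo_counter (group.map pvClubId) []
  simp only [List.nil_append, List.foldl_nil] at hGo
  have h0 : pvF [] = 0 := by simp [pvF]
  omega
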